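-- pv_equiv track=rewrite | github.com/Wolfhan99/LeetCode-Javascript-Solution | 常考代码/笔试题/顺丰2.py | isHateNumber
-- ===== SOURCE A (Python) =====
-- def isHateNumber(num):
--     flag = False
--     i = 0
--     while i*111 <= num:
--         if i > 11:
--             break
--         if (num - i * 111) % 11 == 0:
--             flag = True
--             break
--         i+=1
--     return flag
-- ===== SOURCE B (Python) =====
-- def isHateNumber(num):
--     # Since 111 % 11 == 1, (num - 111*i) % 11 == 0 iff i % 11 == num % 11;
--     # the smallest non-negative such i is num % 11 (always <= 10, within A's i <= 11 bound),
--     # so the number is representable iff 111 * (num % 11) <= num.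
--     return (num % 11) * 111 <= num
-- ===== Notes on version B (the rewrite author's own statement) =====
-- stated objective: simpler
-- what changed: Replaces the trial loop over i with a closed-form test: since 111 is 1 mod 11, the only viable i is num % 11, so B returns (num % 11) * 111 <= num in O(1).
import Mathlib
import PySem

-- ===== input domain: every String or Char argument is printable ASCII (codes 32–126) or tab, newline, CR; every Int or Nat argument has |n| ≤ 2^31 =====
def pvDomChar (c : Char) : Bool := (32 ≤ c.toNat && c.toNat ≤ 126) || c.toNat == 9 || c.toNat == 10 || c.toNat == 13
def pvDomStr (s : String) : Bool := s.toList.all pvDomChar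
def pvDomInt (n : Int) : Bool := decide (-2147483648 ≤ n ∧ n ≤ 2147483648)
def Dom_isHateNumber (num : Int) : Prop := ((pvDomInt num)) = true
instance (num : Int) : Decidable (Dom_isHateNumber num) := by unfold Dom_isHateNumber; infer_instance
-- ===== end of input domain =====

-- B replaces A's trial loop by the closed-form test 111*(num % 11) <= num (simpler; 111 ≡ 1 mod 11).

-- ===== PORT A =====
-- the while loop: guard i*111 <= num, break when i > 11 or on a residue hit.
-- Fuel 13 is enough: starting from i = 0 the loop body runs at most for i = 0..12
-- (at i = 12 the 'i > 11' break fires), so the fuel never runs out from the entry call.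
def isHateNumberLoop (num : Int) (i : Int) : Nat → Bool
  | 0 => false
  | fuel + 1 =>
    if i * 111 ≤ num then
      if i > 11 then false
      else if PySem.Int.mod (num - i * 111) 11 = 0 then true
      else isHateNumberLoop num (i + 1) fuel
    else false

def isHateNumber (num : Int) : Bool := isHateNumberLoop num 0 13

-- ===== PORT B =====
def isHateNumber_alt (num : Int) : Bool := decide (PySem.Int.mod num 11 * 111 ≤ num)

-- ===== PRECONDITION & SPEC =====
def Spec_isHateNumber (num : Int) (out : Bool) : Prop := out = isHateNumber_alt num
instance (num : Int) (out : Bool) : Decidable (Spec_isHateNumber num out) := by unfold Spec_isHateNumber; infer_instance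

-- ===== CLAIM (what is proved, stated in full; the proofs are below) =====
def Claim_equal_isHateNumber : Prop := ∀ (num : Int), Dom_isHateNumber num → Spec_isHateNumber num (isHateNumber num)

-- ===== LEMMAS AND PROOFS =====
theorem isHateNumber_mod_shift (num k : Int) :
    PySem.Int.mod (num - k * 111) 11 = (num - k) % 11 := by
  rw [PySem.Int.mod_eq_emod_of_pos (by norm_num)]
  omega

-- loop invariant: while i has not passed the residue num % 11, the loop's value
-- is exactly the closed-form test.
theorem isHateNumber_loop_inv (num : Int) (fuel : Nat) (i : Int)
    (h0 : 0 ≤ i) (hir : i ≤ num % 11) (hf : (num % 11 - i).toNat < fuel) :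
    isHateNumberLoop num i fuel = decide (num % 11 * 111 ≤ num) := by
  induction fuel generalizing i with
  | zero => omega
  | succ fuel ih =>
    have hub : num % 11 < 11 := Int.emod_lt_of_pos num (by norm_num)
    simp only [isHateNumberLoop, isHateNumber_mod_shift]
    by_cases hg : i * 111 ≤ num
    · rw [if_pos hg, if_neg (by omega : ¬ i > 11)]
      by_cases heq : i = num % 11
      · rw [if_pos (by omega : (num - i) % 11 = 0)]
        subst heq
        exact (decide_eq_true hg).symm
      · rw [if_neg (by omega : ¬ (num - i) % 11 = 0)]
        exact ih (i + 1) (by omega) (by omega) (by omega)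
    · rw [if_neg hg]
      have hmul : i * 111 ≤ num % 11 * 111 :=
        mul_le_mul_of_nonneg_right hir (by norm_num)
      symm
      rw [decide_eq_false_iff_not]
      omega

theorem isHateNumber_eq (num : Int) : isHateNumber num = isHateNumber_alt num := by
  have hm : PySem.Int.mod num 11 = num % 11 := PySem.Int.mod_eq_emod_of_pos (by norm_num)
  have hlb : 0 ≤ num % 11 := Int.emod_nonneg num (by norm_num)
  have hub : num % 11 < 11 := Int.emod_lt_of_pos num (by norm_num)
  by_cases hn : 0 ≤ num
  · rw [isHateNumber, isHateNumber_alt, hm]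
    exact isHateNumber_loop_inv num 13 0 le_rfl hlb (by omega)
  · -- num < 0: the loop guard fails at once; the closed-form test is false too
    rw [isHateNumber, isHateNumber_alt, hm]
    simp only [isHateNumberLoop]
    rw [if_neg (by omega : ¬ (0 : Int) * 111 ≤ num)]
    have : ¬ num % 11 * 111 ≤ num := by nlinarith
    simp [this]

-- ===== VERDICT (by name: the statement is the Claim_ definition above) =====
theorem isHateNumber_spec : Claim_equal_isHateNumber := by
  intro num _
  unfold Spec_isHateNumber
  exact isHateNumber_eq num
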